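-- pv_equiv track=rewrite | github.com/MrBrantCode/unitest_baseline | mut_generate/mist_train_taco/taco_9620/solution.py | is_rich_substring_present
-- ===== SOURCE A (Python) =====
-- from bisect import bisect_left
--
-- def is_rich_substring_present(S, queries):
--     n = len(S)
--     index = []
--
--     # Preprocess the string to find all indices where rich substrings start
--     for i in range(n - 2):
--         dictt = {}
--         for j in S[i:i + 3]:
--             if j in dictt:
--                 dictt[j] += 1
--             else:
--                 dictt[j] = 1
--         if max(dictt.values()) >= 2:
--             index.append(i + 1)
--
--     results = []
--
--     # Process each query
--     for (l, r) in queries: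
--         ind = bisect_left(index, l)
--         if ind == len(index):
--             results.append('NO')
--         elif index[ind] + 2 <= r:
--             results.append('YES')
--         else:
--             results.append('NO')
--
--     return results
-- ===== SOURCE B (Python) =====
-- def is_rich_substring_present(S, queries):
--     n = len(S)
--     # nxt[i-1] = smallest 1-based rich-window start >= i (0 if none), for i in 1..n-2
--     nxt = []
--     cur = 0
--     for i in range(n - 2, 0, -1):
--         if S[i - 1] == S[i] or S[i] == S[i + 1] or S[i - 1] == S[i + 1]:
--             cur = i
--         nxt.append(cur)
--     nxt.reverse()
--     out = []
--     for (l, r) in queries: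
--         li = l if l > 1 else 1
--         s = nxt[li - 1] if li <= n - 2 else 0
--         out.append('YES' if s != 0 and s + 2 <= r else 'NO')
--     return out
-- ===== Notes on version B (the rewrite author's own statement) =====
-- stated objective: faster
-- what changed: Replaces the per-window dict-counting preprocessing and per-query binary search with a single right-to-left scan that precomputes the next rich-window start for every position, making each query an O(1) array lookup.
import Mathlib
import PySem

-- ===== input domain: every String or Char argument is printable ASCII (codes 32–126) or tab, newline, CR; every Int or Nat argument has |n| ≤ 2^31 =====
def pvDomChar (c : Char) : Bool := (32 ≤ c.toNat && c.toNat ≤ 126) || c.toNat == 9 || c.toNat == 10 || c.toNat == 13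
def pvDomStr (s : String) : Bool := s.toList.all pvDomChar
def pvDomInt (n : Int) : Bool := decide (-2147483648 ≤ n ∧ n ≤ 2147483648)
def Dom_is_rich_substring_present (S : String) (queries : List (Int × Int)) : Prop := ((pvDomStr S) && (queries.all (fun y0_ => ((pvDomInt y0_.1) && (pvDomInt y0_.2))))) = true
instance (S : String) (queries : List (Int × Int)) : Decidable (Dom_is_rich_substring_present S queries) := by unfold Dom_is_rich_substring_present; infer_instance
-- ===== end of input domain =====

-- B replaces A's per-window dict counting + per-query bisect with one right-to-left scan
-- precomputing the next rich-window start, so each query is an O(1) lookup (objective: faster).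

-- ===== PORT A =====
-- A-side helpers: the dict-counting loop and the max(dictt.values()) >= 2 test of A's window body
def countChars (w : List Char) : PySem.Dict Char Int :=
  w.foldl (fun d j => if (d.get? j).isSome then d.modify j 0 (fun v => v + 1) else d.insert j 1) ⟨[]⟩

-- Python's max(...) over the window's counts; the window always has length 3, so the `none`
-- (Python: ValueError) branch is unreachable
def maxGe2 (d : PySem.Dict Char Int) : Bool :=
  match PySem.List.max? d.values id with
  | some m => decide (2 ≤ m)
  | none => false

def is_rich_substring_present (S : String) (queries : List (Int × Int)) : List String :=
  let cs := S.toList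
  let n : Int := (cs.length : Int)
  let index : List Int := (PySem.List.pyRange 0 (n - 2) 1).foldl (fun acc i =>
    if maxGe2 (countChars (PySem.List.slice cs (some i) (some (i + 3)))) then acc ++ [i + 1]
    else acc) []
  queries.foldl (fun results lr =>
    let ind := PySem.List.bisectLeft index lr.1
    if ind = index.length then results ++ ["NO"]
    else if (PySem.List.pyGet? index (ind : Int)).getD 0 + 2 ≤ lr.2 then results ++ ["YES"]
    else results ++ ["NO"]) []

-- ===== PORT B =====
def is_rich_substring_present_alt (S : String) (queries : List (Int × Int)) : List String :=
  let cs := S.toList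
  let n : Int := (cs.length : Int)
  -- right-to-left scan; the loop keeps (cur, nxt-so-far); indices are always in range,
  -- so the `.getD` defaults are unreachable
  let st := (PySem.List.pyRange (n - 2) 0 (-1)).foldl (fun (st : Int × List Int) i =>
    let a := (PySem.List.pyGet? cs (i - 1)).getD ' '
    let b := (PySem.List.pyGet? cs i).getD ' '
    let c := (PySem.List.pyGet? cs (i + 1)).getD ' '
    let cur := if a == b || b == c || a == c then i else st.1
    (cur, st.2 ++ [cur])) (0, [])
  let nxt := st.2.reverse
  queries.foldl (fun out lr =>
    let li := if 1 < lr.1 then lr.1 else 1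
    let s := if li ≤ n - 2 then (PySem.List.pyGet? nxt (li - 1)).getD 0 else 0
    out ++ [if s ≠ 0 ∧ s + 2 ≤ lr.2 then "YES" else "NO"]) []

-- ===== PRECONDITION & SPEC =====
def Spec_is_rich_substring_present (S : String) (queries : List (Int × Int)) (out : List String) : Prop := out = is_rich_substring_present_alt S queries
instance (S : String) (queries : List (Int × Int)) (out : List String) : Decidable (Spec_is_rich_substring_present S queries out) := by unfold Spec_is_rich_substring_present; infer_instance

-- ===== CLAIM (what is proved, stated in full; the proofs are below) =====
def Claim_equal_is_rich_substring_present : Prop := ∀ (S : String) (queries : List (Int × Int)), Dom_is_rich_substring_present S queries → Spec_is_rich_substring_present S queries (is_rich_substring_present S queries)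

-- ===== LEMMAS AND PROOFS =====

def dup3 (a b c : Char) : Bool := a == b || b == c || a == c

def richAt (cs : List Char) (i : Nat) : Bool := dup3 (cs.getD i ' ') (cs.getD (i + 1) ' ') (cs.getD (i + 2) ' ')

def richList (cs : List Char) : List Int :=
  ((List.range (cs.length - 2)).filter (richAt cs)).map (fun i : Nat => (i : Int) + 1)

def minFromFuel (cs : List Char) : Nat → Nat → Int
  | _, 0 => 0
  | k, t + 1 => if richAt cs (k - 1) then (k : Int) else minFromFuel cs (k + 1) t

def answer (cs : List Char) (lr : Int × Int) : String :=
  if (List.range (cs.length - 2)).any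
      (fun i => richAt cs i && decide (lr.1 ≤ (i : Int) + 1) && decide ((i : Int) + 3 ≤ lr.2))
  then "YES" else "NO"

lemma any_iff (cs : List Char) (lr : Int × Int) :
    ((List.range (cs.length - 2)).any
      (fun i => richAt cs i && decide (lr.1 ≤ (i : Int) + 1) && decide ((i : Int) + 3 ≤ lr.2)) = true) ↔
    ∃ i : Nat, i < cs.length - 2 ∧ richAt cs i = true ∧ lr.1 ≤ (i : Int) + 1 ∧ (i : Int) + 3 ≤ lr.2 := by
  simp [List.any_eq_true, List.mem_range, and_assoc]

lemma win_eq (a b c : Char) : maxGe2 (countChars [a, b, c]) = dup3 a b c := by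
  by_cases hab : a = b <;> by_cases hbc : b = c <;> by_cases hac : a = c <;> subst_vars <;>
    simp_all [maxGe2, countChars, dup3, PySem.Dict.get?, PySem.Dict.insert, PySem.Dict.modify,
      PySem.Dict.getD, PySem.Dict.contains, PySem.Dict.values, PySem.List.max?, List.foldl]

lemma slice_window (cs : List Char) (i : Nat) (h : i + 3 ≤ cs.length) :
    PySem.List.slice cs (some (i : Int)) (some ((i : Int) + 3)) =
      [cs.getD i ' ', cs.getD (i + 1) ' ', cs.getD (i + 2) ' '] := by
  have h3 : ((i : Int) + 3) = ((i + 3 : Nat) : Int) := by push_cast; ring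
  rw [h3, PySem.List.slice_natCast]
  have hd : i + 3 - i = 3 := by omega
  rw [hd]
  have h0 : i < cs.length := by omega
  have h1 : i + 1 < cs.length := by omega
  have h2 : i + 2 < cs.length := by omega
  rw [List.drop_eq_getElem_cons h0, List.drop_eq_getElem_cons h1, List.drop_eq_getElem_cons h2,
    List.take_succ_cons, List.take_succ_cons, List.take_succ_cons, List.take_zero]
  simp only [List.getD_eq_getElem?_getD, List.getElem?_eq_getElem, h0, h1, h2, Option.getD_some]

lemma index_eq (cs : List Char) :
    (PySem.List.pyRange 0 ((cs.length : Int) - 2) 1).foldl (fun acc i =>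
      if maxGe2 (countChars (PySem.List.slice cs (some i) (some (i + 3)))) then acc ++ [i + 1]
      else acc) [] = richList cs := by
  rcases Nat.lt_or_ge cs.length 2 with h | h
  · have hempty : PySem.List.pyRange 0 ((cs.length : Int) - 2) 1 = [] := by
      rw [PySem.List.pyRange_of_pos _ _ Int.one_pos,
        if_neg (show ¬((0 : Int) < (cs.length : Int) - 2) by omega)]
      simp
    rw [hempty]
    simp [richList, show cs.length - 2 = 0 by omega]
  · have hcast : (cs.length : Int) - 2 = ((cs.length - 2 : Nat) : Int) := by omega
    rw [hcast, PySem.List.pyRange_zero_natCast, List.foldl_map]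
    rw [PySem.List.foldl_congr_mem _ _
      (fun (acc : List Int) (i : Nat) => if richAt cs i = true then acc ++ [(i : Int) + 1] else acc) []
      (by
        intro acc i hi
        have him : i < cs.length - 2 := List.mem_range.mp hi
        have hle : i + 3 ≤ cs.length := by omega
        rw [slice_window cs i hle, win_eq]
        rfl)]
    rw [PySem.List.foldl_append_if (fun i : Nat => richAt cs i) (fun i : Nat => (i : Int) + 1)]
    simp only [List.nil_append, richList]

lemma richList_pairwise (cs : List Char) : (richList cs).Pairwise (· ≤ ·) := by
  unfold richList
  rw [List.pairwise_map]
  have h1 : (List.range (cs.length - 2)).Pairwise (· < ·) := List.pairwise_lt_range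
  exact (h1.filter (richAt cs)).imp (fun h => by omega)

lemma mem_richList (cs : List Char) (j : Int) :
    j ∈ richList cs ↔ ∃ i : Nat, i < cs.length - 2 ∧ richAt cs i = true ∧ j = (i : Int) + 1 := by
  unfold richList
  simp only [List.mem_map, List.mem_filter, List.mem_range]
  constructor
  · rintro ⟨i, ⟨h1, h2⟩, h3⟩; exact ⟨i, h1, h2, h3.symm⟩
  · rintro ⟨i, h1, h2, h3⟩; exact ⟨i, ⟨h1, h2⟩, h3.symm⟩

lemma richList_mono (cs : List Char) (u v : Nat) (hu : u < (richList cs).length)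
    (hv : v < (richList cs).length) (huv : u ≤ v) : (richList cs)[u] ≤ (richList cs)[v] := by
  rcases eq_or_lt_of_le huv with rfl | hlt
  · exact le_rfl
  · exact List.pairwise_iff_getElem.mp (richList_pairwise cs) u v hu hv hlt

lemma A_query (cs : List Char) (lr : Int × Int) :
    (let index := richList cs
     let ind := PySem.List.bisectLeft index lr.1
     if ind = index.length then "NO"
     else if (PySem.List.pyGet? index (ind : Int)).getD 0 + 2 ≤ lr.2 then "YES"
     else "NO") = answer cs lr := by
  simp only []
  obtain ⟨hle, hlt, hge⟩ := PySem.List.bisectLeft_spec (richList cs) lr.1 (richList_pairwise cs)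
  set idx := richList cs with hidx
  set ind := PySem.List.bisectLeft idx lr.1 with hindDef
  unfold answer
  by_cases hE : ∃ i : Nat, i < cs.length - 2 ∧ richAt cs i = true ∧ lr.1 ≤ (i : Int) + 1 ∧ (i : Int) + 3 ≤ lr.2
  · rw [if_pos ((any_iff cs lr).mpr hE)]
    obtain ⟨i, hi, hrich, hl, hr⟩ := hE
    have hj : ((i : Int) + 1) ∈ idx := (mem_richList cs _).mpr ⟨i, hi, hrich, rfl⟩
    obtain ⟨p, hp, hpj⟩ := List.mem_iff_getElem.mp hj
    have hend : ind ≠ idx.length := by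
      intro hcontra
      have := hlt p hp (by omega)
      omega
    have hind : ind < idx.length := lt_of_le_of_ne hle hend
    rw [if_neg hend]
    rw [PySem.List.pyGet?_natCast, List.getElem?_eq_getElem hind, Option.getD_some]
    have hple : ind ≤ p := by
      by_contra hcontra
      have := hlt p hp (by omega)
      omega
    have : idx[ind] ≤ idx[p] := richList_mono cs ind p hind hp hple
    rw [if_pos (by omega)]
  · rw [if_neg (fun hany => hE ((any_iff cs lr).mp hany))]
    by_cases hend : ind = idx.length
    · rw [if_pos hend]
    · have hind : ind < idx.length := lt_of_le_of_ne hle hend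
      rw [if_neg hend, PySem.List.pyGet?_natCast, List.getElem?_eq_getElem hind, Option.getD_some]
      rw [if_neg]
      intro hr
      have hmem : idx[ind] ∈ idx := List.getElem_mem hind
      obtain ⟨i, hi, hrich, hij⟩ := (mem_richList cs _).mp hmem
      have hgel : lr.1 ≤ idx[ind] := hge ind hind le_rfl
      exact hE ⟨i, hi, hrich, by omega, by omega⟩

lemma minFromFuel_spec (cs : List Char) (t : Nat) : ∀ k : Nat, 1 ≤ k →
    k + t = cs.length - 2 + 1 →
    (minFromFuel cs k t = 0 ∧ ∀ j : Nat, k ≤ j → j ≤ cs.length - 2 → richAt cs (j - 1) = false) ∨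
    (∃ j : Nat, minFromFuel cs k t = (j : Int) ∧ 1 ≤ j ∧ k ≤ j ∧ j ≤ cs.length - 2 ∧ richAt cs (j - 1) = true ∧
      ∀ j' : Nat, k ≤ j' → j' < j → richAt cs (j' - 1) = false) := by
  induction t with
  | zero =>
    intro k hk hkt
    left
    exact ⟨rfl, fun j hj1 hj2 => by omega⟩
  | succ t ih =>
    intro k hk hkt
    by_cases hr : richAt cs (k - 1) = true
    · right
      exact ⟨k, by simp [minFromFuel, hr], hk, le_rfl, by omega, hr, fun j' h1 h2 => by omega⟩
    · have hb : richAt cs (k - 1) = false := by simpa using hr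
      have hval : minFromFuel cs k (t + 1) = minFromFuel cs (k + 1) t := by simp [minFromFuel, hb]
      rcases ih (k + 1) (by omega) (by omega) with ⟨h0, hall⟩ | ⟨j, hv, hj1, hkj, hjm, hrich, hmin⟩
      · left
        refine ⟨by rw [hval, h0], ?_⟩
        intro j hj1 hj2
        rcases eq_or_lt_of_le hj1 with rfl | hlt
        · exact hb
        · exact hall j (by omega) hj2
      · right
        refine ⟨j, by rw [hval, hv], hj1, by omega, hjm, hrich, ?_⟩
        intro j' h1 h2
        rcases eq_or_lt_of_le h1 with rfl | hlt
        · exact hb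
        · exact hmin j' (by omega) h2

lemma pyRange_desc (a : Int) :
    PySem.List.pyRange a 0 (-1) = (List.range a.toNat).map (fun k : Nat => a - (k : Int)) := by
  by_cases ha : 0 < a
  · simp only [PySem.List.pyRange, if_neg (by norm_num : ¬(-1 : Int) = 0),
      if_neg (by norm_num : ¬(0 : Int) < -1), if_pos ha]
    have h1 : (a - 0 + - -1 - 1) / - -1 = a := by norm_num
    rw [h1]
    exact List.map_congr_left (fun k _ => by ring)
  · have h0 : a.toNat = 0 := by omega
    simp only [PySem.List.pyRange, if_neg (by norm_num : ¬(-1 : Int) = 0),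
      if_neg (by norm_num : ¬(0 : Int) < -1), if_neg (by omega : ¬(0 : Int) < a), h0]
    simp

lemma foldDesc (cs : List Char) (t : Nat) (ht : t ≤ cs.length - 2) :
    ((List.range t).map (fun k : Nat => ((cs.length - 2 : Nat) : Int) - (k : Int))).foldl
      (fun (st : Int × List Int) i =>
        (if ((PySem.List.pyGet? cs (i - 1)).getD ' ' == (PySem.List.pyGet? cs i).getD ' ' ||
             (PySem.List.pyGet? cs i).getD ' ' == (PySem.List.pyGet? cs (i + 1)).getD ' ' ||
             (PySem.List.pyGet? cs (i - 1)).getD ' ' == (PySem.List.pyGet? cs (i + 1)).getD ' ')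
         then i else st.1,
         st.2 ++ [if ((PySem.List.pyGet? cs (i - 1)).getD ' ' == (PySem.List.pyGet? cs i).getD ' ' ||
             (PySem.List.pyGet? cs i).getD ' ' == (PySem.List.pyGet? cs (i + 1)).getD ' ' ||
             (PySem.List.pyGet? cs (i - 1)).getD ' ' == (PySem.List.pyGet? cs (i + 1)).getD ' ')
         then i else st.1])) (0, []) =
    (minFromFuel cs (cs.length - 2 - t + 1) t,
     (List.range t).map (fun k => minFromFuel cs (cs.length - 2 - k) (k + 1))) := by
  induction t with
  | zero => simp [minFromFuel]
  | succ t ih =>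
    have ht' : t ≤ cs.length - 2 := by omega
    rw [List.range_succ, List.map_append, List.foldl_append, ih ht']
    set m := cs.length - 2 with hm
    have hmlen : m + 2 ≤ cs.length := by omega
    have htm : t < m := by omega
    simp only [List.map_cons, List.map_nil, List.foldl_cons, List.foldl_nil]
    have hi1 : ((m : Nat) : Int) - (t : Int) - 1 = ((m - t - 1 : Nat) : Int) := by omega
    have hi0 : ((m : Nat) : Int) - (t : Int) = ((m - t : Nat) : Int) := by omega
    have hi2 : ((m : Nat) : Int) - (t : Int) + 1 = ((m - t + 1 : Nat) : Int) := by omega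
    have hg1 : (PySem.List.pyGet? cs (((m - t - 1 : Nat) : Int))).getD ' ' = cs.getD (m - t - 1) ' ' := by
      rw [PySem.List.pyGet?_natCast, List.getD_eq_getElem?_getD]
    have hg0 : (PySem.List.pyGet? cs (((m - t : Nat) : Int))).getD ' ' = cs.getD (m - t) ' ' := by
      rw [PySem.List.pyGet?_natCast, List.getD_eq_getElem?_getD]
    have hg2 : (PySem.List.pyGet? cs (((m - t + 1 : Nat) : Int))).getD ' ' = cs.getD (m - t + 1) ' ' := by
      rw [PySem.List.pyGet?_natCast, List.getD_eq_getElem?_getD]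
    have hcond : ((PySem.List.pyGet? cs ((((m : Nat) : Int) - (t : Int)) - 1)).getD ' ' == (PySem.List.pyGet? cs (((m : Nat) : Int) - (t : Int))).getD ' ' ||
             (PySem.List.pyGet? cs (((m : Nat) : Int) - (t : Int))).getD ' ' == (PySem.List.pyGet? cs ((((m : Nat) : Int) - (t : Int)) + 1)).getD ' ' ||
             (PySem.List.pyGet? cs ((((m : Nat) : Int) - (t : Int)) - 1)).getD ' ' == (PySem.List.pyGet? cs ((((m : Nat) : Int) - (t : Int)) + 1)).getD ' ')
        = richAt cs (m - t - 1) := by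
      have hi2' : ((m - t : Nat) : Int) + 1 = ((m - t + 1 : Nat) : Int) := by omega
      rw [hi1, hi0, hi2', hg1, hg0, hg2]
      have e1 : m - t - 1 + 1 = m - t := by omega
      have e2 : m - t - 1 + 2 = m - t + 1 := by omega
      simp [richAt, dup3, e1, e2]
    have hcur : (if ((PySem.List.pyGet? cs ((((m : Nat) : Int) - (t : Int)) - 1)).getD ' ' == (PySem.List.pyGet? cs (((m : Nat) : Int) - (t : Int))).getD ' ' ||
             (PySem.List.pyGet? cs (((m : Nat) : Int) - (t : Int))).getD ' ' == (PySem.List.pyGet? cs ((((m : Nat) : Int) - (t : Int)) + 1)).getD ' ' ||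
             (PySem.List.pyGet? cs ((((m : Nat) : Int) - (t : Int)) - 1)).getD ' ' == (PySem.List.pyGet? cs ((((m : Nat) : Int) - (t : Int)) + 1)).getD ' ')
         then ((m : Nat) : Int) - (t : Int) else minFromFuel cs (m - t + 1) t)
        = minFromFuel cs (m - t) (t + 1) := by
      rw [hcond]
      have hk1 : m - t - 1 = (m - t) - 1 := by omega
      simp only [minFromFuel]
      split_ifs with h
      · exact hi0
      · have : m - t + 1 = (m - t) + 1 := by omega
        rw [this]
    refine Prod.ext ?_ ?_
    · simp only [hcur]
      have : m - (t + 1) + 1 = m - t := by omega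
      rw [this]
    · simp only [hcur, List.map_append, List.map_cons, List.map_nil]

lemma B_nxt (cs : List Char) :
    ((PySem.List.pyRange ((cs.length : Int) - 2) 0 (-1)).foldl (fun (st : Int × List Int) i =>
        (if ((PySem.List.pyGet? cs (i - 1)).getD ' ' == (PySem.List.pyGet? cs i).getD ' ' ||
             (PySem.List.pyGet? cs i).getD ' ' == (PySem.List.pyGet? cs (i + 1)).getD ' ' ||
             (PySem.List.pyGet? cs (i - 1)).getD ' ' == (PySem.List.pyGet? cs (i + 1)).getD ' ')
         then i else st.1,
         st.2 ++ [if ((PySem.List.pyGet? cs (i - 1)).getD ' ' == (PySem.List.pyGet? cs i).getD ' ' ||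
             (PySem.List.pyGet? cs i).getD ' ' == (PySem.List.pyGet? cs (i + 1)).getD ' ' ||
             (PySem.List.pyGet? cs (i - 1)).getD ' ' == (PySem.List.pyGet? cs (i + 1)).getD ' ')
         then i else st.1])) (0, [])).2.reverse =
    (List.range (cs.length - 2)).map (fun k => minFromFuel cs (k + 1) (cs.length - 2 - k)) := by
  rcases Nat.lt_or_ge cs.length 2 with h | h
  · have h0 : ((cs.length : Int) - 2).toNat = 0 := by omega
    rw [pyRange_desc, h0]
    simp [show cs.length - 2 = 0 by omega]
  · have hcast : (cs.length : Int) - 2 = ((cs.length - 2 : Nat) : Int) := by omega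
    have h0 : ((cs.length : Int) - 2).toNat = cs.length - 2 := by omega
    rw [pyRange_desc, h0, hcast, foldDesc cs (cs.length - 2) le_rfl]
    set m := cs.length - 2 with hm
    apply List.ext_getElem
    · simp
    · intro k hk1 hk2
      simp only [List.length_reverse, List.length_map, List.length_range] at hk1 hk2 ⊢
      rw [List.getElem_reverse]
      simp only [List.getElem_map, List.getElem_range, List.length_map, List.length_range]
      have e1 : m - (m - 1 - k) = k + 1 := by omega
      have e2 : m - 1 - k + 1 = m - k := by omega
      rw [e1, e2]

lemma B_query (cs : List Char) (lr : Int × Int) :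
    (let nxt := (List.range (cs.length - 2)).map (fun k => minFromFuel cs (k + 1) (cs.length - 2 - k))
     let li := if 1 < lr.1 then lr.1 else 1
     let s := if li ≤ (cs.length : Int) - 2 then (PySem.List.pyGet? nxt (li - 1)).getD 0 else 0
     if s ≠ 0 ∧ s + 2 ≤ lr.2 then "YES" else "NO") = answer cs lr := by
  simp only []
  set m := cs.length - 2 with hm
  set li : Int := if 1 < lr.1 then lr.1 else 1 with hli
  have hli1 : 1 ≤ li := by rw [hli]; split_ifs <;> omega
  have hlil : lr.1 ≤ li := by rw [hli]; split_ifs <;> omega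
  have hlimax : ∀ j : Int, 1 ≤ j → lr.1 ≤ j → li ≤ j := by
    intro j h1 h2; rw [hli]; split_ifs <;> omega
  unfold answer
  by_cases hin : li ≤ (cs.length : Int) - 2
  · have hm1 : 1 ≤ m := by omega
    set k := li.toNat with hk
    have hk1 : 1 ≤ k := by omega
    have hkm : k ≤ m := by omega
    have hklt : k - 1 < m := by omega
    have hidx : li - 1 = ((k - 1 : Nat) : Int) := by omega
    have hsval : (if li ≤ (cs.length : Int) - 2 then
        (PySem.List.pyGet? ((List.range m).map (fun k => minFromFuel cs (k + 1) (m - k))) (li - 1)).getD 0 else 0)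
        = minFromFuel cs k (m + 1 - k) := by
      rw [if_pos hin, hidx, PySem.List.pyGet?_natCast]
      rw [List.getElem?_map, List.getElem?_range (by omega)]
      simp only [Option.map_some, Option.getD_some]
      have e1 : k - 1 + 1 = k := by omega
      have e2 : m - (k - 1) = m + 1 - k := by omega
      rw [e1, e2]
    rw [hsval]
    rcases minFromFuel_spec cs (m + 1 - k) k hk1 (by omega) with ⟨h0, hall⟩ | ⟨j, hv, hj1, hkj, hjm, hrich, hmin⟩
    · rw [h0]
      rw [if_neg (by simp)]
      rw [if_neg]
      intro hany
      obtain ⟨i, hi, hr, hl1, _⟩ := (any_iff cs lr).mp hany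
      have : k ≤ i + 1 := by
        have := hlimax ((i : Int) + 1) (by omega) hl1
        omega
      have hfa := hall (i + 1) this (by omega)
      simp only [Nat.add_sub_cancel] at hfa
      rw [hfa] at hr
      exact absurd hr Bool.false_ne_true
    · rw [hv]
      by_cases hr2 : (j : Int) + 2 ≤ lr.2
      · rw [if_pos ⟨by omega, hr2⟩]
        rw [if_pos]
        refine (any_iff cs lr).mpr ⟨j - 1, by omega, ?_, by omega, by omega⟩
        have : j - 1 + 1 - 1 = j - 1 := by omega
        simpa using hrich
      · rw [if_neg (by omega)]
        rw [if_neg]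
        intro hany
        obtain ⟨i, hi, hr, hl1, hl2⟩ := (any_iff cs lr).mp hany
        have hki : k ≤ i + 1 := by
          have := hlimax ((i : Int) + 1) (by omega) hl1
          omega
        have hji : j ≤ i + 1 := by
          by_contra hcontra
          have hfa := hmin (i + 1) hki (by omega)
          simp only [Nat.add_sub_cancel] at hfa
          rw [hfa] at hr
          exact absurd hr Bool.false_ne_true
        omega
  · rw [if_neg hin, if_neg (by simp), if_neg]
    intro hany
    obtain ⟨i, hi, hr, hl1, _⟩ := (any_iff cs lr).mp hany
    have h1 : li ≤ (i : Int) + 1 := hlimax _ (by omega) hl1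
    have h2 : (i : Int) + 1 ≤ (cs.length : Int) - 2 := by omega
    omega

lemma ite_append {α : Type} (acc : List α) (c1 c2 : Prop) [Decidable c1] [Decidable c2]
    (x y z : α) :
    (if c1 then acc ++ [x] else if c2 then acc ++ [y] else acc ++ [z]) =
      acc ++ [if c1 then x else if c2 then y else z] := by
  split_ifs <;> rfl

lemma A_eq_map (S : String) (queries : List (Int × Int)) :
    is_rich_substring_present S queries = queries.map (answer S.toList) := by
  simp only [is_rich_substring_present]
  rw [index_eq]
  rw [PySem.List.foldl_congr_mem queries _
    (fun (acc : List String) lr => acc ++ [answer S.toList lr]) []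
    (by
      intro acc lr _
      exact (ite_append acc _ _ "NO" "YES" "NO").trans
        (congrArg (fun s => acc ++ [s]) (A_query S.toList lr)))]
  rw [PySem.List.foldl_append_singleton_eq_map]
  simp

lemma B_eq_map (S : String) (queries : List (Int × Int)) :
    is_rich_substring_present_alt S queries = queries.map (answer S.toList) := by
  simp only [is_rich_substring_present_alt]
  rw [B_nxt]
  rw [PySem.List.foldl_congr_mem queries _
    (fun (acc : List String) lr => acc ++ [answer S.toList lr]) []
    (by
      intro acc lr _
      exact congrArg (fun s => acc ++ [s]) (B_query S.toList lr))]
  rw [PySem.List.foldl_append_singleton_eq_map]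
  simp

-- ===== VERDICT (by name: the statement is the Claim_ definition above) =====
theorem is_rich_substring_present_spec : Claim_equal_is_rich_substring_present := by
  intro S queries _
  unfold Spec_is_rich_substring_present
  rw [A_eq_map, B_eq_map]
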